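-- pv_equiv track=rewrite | github.com/NeedtoLearn/codejam | 2020/round1A/pattern_matching.py | solve
-- ===== SOURCE A (Python) =====
-- def solve(patterns):
--     tokens, starts, ends = [], [], []
--     for pattern in patterns:
--         token = pattern.split('*')
--         if token[0]:
--             starts.append(token[0])
--             token = token[1:]
--         if token[-1]:
--             ends.append(token[-1])
--             token = token[:-1]
--         tokens.append(token)
--     # Check if starts and ends are valid
--     starts.sort(key=len)
--     for start in starts:
--         if not starts[-1].startswith(start):
--             return '*'
--     ends.sort(key=len)
--     for end in ends:
--         if not ends[-1].endswith(end):
--             return '*'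
--     return (starts[-1] if starts else '') + ''.join(''.join(token) for token in tokens) + (ends[-1] if ends else '')
-- ===== SOURCE B (Python) =====
-- def solve(patterns):
--     best_pre = ''
--     best_suf = ''
--     middle = []
--     for pattern in patterns:
--         parts = pattern.split('*')
--         if len(parts) == 1:
--             middle.append(parts[0])
--             continue
--         pre, suf = parts[0], parts[-1]
--         if pre:
--             if pre.startswith(best_pre):
--                 best_pre = pre
--             elif not best_pre.startswith(pre):
--                 return '*'
--         middle.extend(parts[1:-1])
--         if suf:
--             if suf.endswith(best_suf):
--                 best_suf = suf
--             elif not best_suf.endswith(suf):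
--                 return '*'
--     return best_pre + ''.join(middle) + best_suf
-- ===== Notes on version B (the rewrite author's own statement) =====
-- stated objective: simpler
-- what changed: B replaces A's collect-everything-then-sort-then-verify pipeline (two sorts plus two verification loops over the collected prefixes/suffixes) by a single streaming pass that splits each pattern once and maintains a running longest-compatible prefix and suffix, returning '*' as soon as an incompatibility appears.
-- outside the precondition, e.g. on solve(['ab']): A raises IndexError, B returns 'ab'
import Mathlib
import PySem

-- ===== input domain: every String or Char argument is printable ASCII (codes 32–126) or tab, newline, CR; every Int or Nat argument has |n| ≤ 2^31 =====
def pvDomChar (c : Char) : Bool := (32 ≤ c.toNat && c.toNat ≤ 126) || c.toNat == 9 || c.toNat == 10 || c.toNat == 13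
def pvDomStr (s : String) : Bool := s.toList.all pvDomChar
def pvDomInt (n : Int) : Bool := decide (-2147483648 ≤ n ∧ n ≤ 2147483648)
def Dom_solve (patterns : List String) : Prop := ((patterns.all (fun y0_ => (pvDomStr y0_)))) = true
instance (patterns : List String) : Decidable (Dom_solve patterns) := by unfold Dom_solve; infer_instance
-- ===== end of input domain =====

-- B replaces A's collect-sort-verify pipeline by one streaming pass that keeps a running longest
-- compatible prefix/suffix (objective: simpler one-pass decomposition, no sorting).

-- shared helper: pattern.split('*') (sep is the non-empty literal '*', so split? is always `some`)
def splitStar (p : String) : List String := (PySem.Str.split? p "*").getD []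

-- ===== PORT A =====
-- the for-loop of A; `none` = the IndexError A raises at token[-1] when token is empty
def solveLoopA : List String → List (List String) → List String → List String →
    Option (List (List String) × List String × List String)
  | [], tokens, starts, ends => some (tokens, starts, ends)
  | p :: rest, tokens, starts, ends =>
    let token0 := splitStar p
    -- if token[0]: starts.append(token[0]); token = token[1:]
    let starts' := if token0.headI ≠ "" then starts ++ [token0.headI] else starts
    let token1 := if token0.headI ≠ "" then token0.tail else token0
    -- if token[-1]: ends.append(token[-1]); token = token[:-1]   (token[-1] raises on empty token)
    match PySem.List.pyGet? token1 (-1) with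
    | none => none
    | some last =>
      let ends' := if last ≠ "" then ends ++ [last] else ends
      let token2 := if last ≠ "" then token1.dropLast else token1
      solveLoopA rest (tokens ++ [token2]) starts' ends'

def solve (patterns : List String) : String :=
  match solveLoopA patterns [] [] [] with
  | none => ""   -- unreachable under Pre_solve: Python raises IndexError here
  | some (tokens, starts, ends) =>
    let ss := PySem.List.sorted starts PySem.Str.len
    if ss.any (fun s => !(PySem.Str.startswith (ss.getLastD "") s)) then "*"
    else
      let es := PySem.List.sorted ends PySem.Str.len
      if es.any (fun e => !(PySem.Str.endswith (es.getLastD "") e)) then "*"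
      else PySem.Str.join ""
        ([ss.getLastD ""] ++ tokens.map (fun t => PySem.Str.join "" t) ++ [es.getLastD ""])

-- ===== PORT B =====
def solveAltLoop : List String → String → String → List String → String
  | [], pre, suf, mid => PySem.Str.join "" ([pre] ++ mid ++ [suf])
  | p :: rest, pre, suf, mid =>
    let parts := splitStar p
    if parts.length == 1 then solveAltLoop rest pre suf (mid ++ [parts.headI])
    else
      let p0 := parts.headI
      let pl := parts.getLastD ""
      match (if p0 = "" then some pre
             else if PySem.Str.startswith p0 pre then some p0
             else if PySem.Str.startswith pre p0 then some pre
             else none) with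
      | none => "*"
      | some pre' =>
        let mid' := mid ++ parts.tail.dropLast
        match (if pl = "" then some suf
               else if PySem.Str.endswith pl suf then some pl
               else if PySem.Str.endswith suf pl then some suf
               else none) with
        | none => "*"
        | some suf' => solveAltLoop rest pre' suf' mid'

def solve_alt (patterns : List String) : String := solveAltLoop patterns "" "" []

-- ===== PRECONDITION & SPEC =====
-- Pre_ excludes patterns containing a non-empty string without '*': there Python A raises
-- IndexError at token[-1] (it never returns).
def Pre_solve (patterns : List String) : Prop :=
  ∀ p ∈ patterns, p = "" ∨ PySem.Str.isIn "*" p = true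
instance (patterns : List String) : Decidable (Pre_solve patterns) := by
  unfold Pre_solve; infer_instance
def pvWitness_solve : List String := ["a*b", "*", "", "ab*c*d"]

def Spec_solve (patterns : List String) (out : String) : Prop := out = solve_alt patterns
instance (patterns : List String) (out : String) : Decidable (Spec_solve patterns out) := by unfold Spec_solve; infer_instance

-- ===== CLAIM (what is proved, stated in full; the proofs are below) =====
def Claim_equal_solve : Prop := ∀ (patterns : List String), Dom_solve patterns → Pre_solve patterns → Spec_solve patterns (solve patterns)

-- ===== LEMMAS AND PROOFS =====

theorem map_toList_splitStar (p : String) : (splitStar p).map String.toList = PySem.Chars.splitOn p.toList ['*'] := by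
  have h := PySem.Str.split?_map p "*"
  rw [PySem.Chars.split?] at h
  simp only [List.isEmpty_iff] at h
  cases hq : PySem.Str.split? p "*" with
  | none => rw [hq] at h; simp at h
  | some v =>
    rw [hq] at h
    simp only [Option.map_some, if_neg (by decide : ¬("*".toList = []))] at h
    simpa [splitStar, hq] using (Option.some.inj h)
theorem pyGet?_neg_one {α : Type} (xs : List α) (d : α) (h : xs ≠ []) :
    PySem.List.pyGet? xs (-1) = some (xs.getLastD d) := by
  have hl : 1 ≤ xs.length := by cases xs <;> simp_all
  simp only [PySem.List.pyGet?, PySem.List.pyIdx?]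
  norm_num
  rw [if_pos hl]
  have hg : xs[xs.length - 1]? = xs.getLast? := (List.getLast?_eq_getElem? (l := xs)).symm
  simp only [Option.bind]
  rw [hg]
  cases hx : xs.getLast? with
  | none => exact absurd (List.getLast?_eq_none_iff.mp hx) h
  | some y => simp
-- fuel lemmas
theorem go_len_lb : ∀ (fuel : Nat) (l cur : List Char) (acc : List (List Char)),
    acc.length + 1 ≤ (PySem.Chars.splitOn.go ['*'] fuel l cur acc).length := by
  intro fuel
  induction fuel with
  | zero => intro l cur acc; simp [PySem.Chars.splitOn.go]
  | succ n ih =>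
    intro l cur acc
    cases l with
    | nil => simp [PySem.Chars.splitOn.go]
    | cons c rest =>
      rw [PySem.Chars.splitOn.go]
      by_cases hc : List.isPrefixOf ['*'] (c :: rest)
      · simp only [hc, if_true]
        have := ih (List.drop 1 (c::rest)) [] (cur.reverse :: acc)
        simp at this ⊢; omega
      · simp only [hc, if_false]
        exact ih rest (c :: cur) acc
theorem go_len_lb2 : ∀ (fuel : Nat) (l cur : List Char) (acc : List (List Char)),
    l.length < fuel → '*' ∈ l →
    acc.length + 2 ≤ (PySem.Chars.splitOn.go ['*'] fuel l cur acc).length := by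
  intro fuel
  induction fuel with
  | zero => intro l cur acc h; omega
  | succ n ih =>
    intro l cur acc hf hm
    cases l with
    | nil => simp at hm
    | cons c rest =>
      rw [PySem.Chars.splitOn.go]
      by_cases hc : List.isPrefixOf ['*'] (c :: rest)
      · simp only [hc, if_true]
        have := go_len_lb n (List.drop 1 (c::rest)) [] (cur.reverse :: acc)
        simp at this ⊢; omega
      · simp only [hc, if_false]
        have hcne : c ≠ '*' := by
          intro he; apply hc; simp [he, List.isPrefixOf]
        have : '*' ∈ rest := by
          cases hm with
          | head => exact absurd rfl hcne
          | tail _ h => exact h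
        exact ih rest (c :: cur) acc (by simp at hf ⊢; omega) this

theorem two_le_splitStar (p : String) (h : PySem.Str.isIn "*" p = true) : 2 ≤ (splitStar p).length := by
  have hmem : '*' ∈ p.toList := by
    have hinf := (PySem.Str.isIn_iff_infix "*" p).mp h
    exact hinf.mem (by decide)
  have h2 : 2 ≤ (PySem.Chars.splitOn p.toList ['*']).length := by
    have := go_len_lb2 (p.toList.length + 1) p.toList [] [] (by omega) hmem
    simpa [PySem.Chars.splitOn] using this
  calc 2 ≤ (PySem.Chars.splitOn p.toList ['*']).length := h2
    _ = ((splitStar p).map String.toList).length := by rw [map_toList_splitStar]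
    _ = (splitStar p).length := by simp
def foldPre : List String → String → Option String
  | [], b => some b
  | s :: rest, b =>
    if s = "" then foldPre rest b
    else if PySem.Str.startswith s b then foldPre rest s
    else if PySem.Str.startswith b s then foldPre rest b
    else none

theorem sw_iff (s b : String) : PySem.Str.startswith s b = true ↔ b.toList <+: s.toList := by
  rw [PySem.Str.startswith_eq]; exact PySem.Chars.startswith_iff _ _

theorem foldPre_some : ∀ (L : List String) (b P : String), foldPre L b = some P →
    b.toList <+: P.toList ∧ (∀ s ∈ L, s.toList <+: P.toList) ∧ (P = b ∨ (P ∈ L ∧ P ≠ "")) := by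
  intro L
  induction L with
  | nil => intro b P h; simp [foldPre] at h; subst h; simp
  | cons s rest ih =>
    intro b P h
    rw [foldPre] at h
    by_cases h0 : s = ""
    · rw [if_pos h0] at h
      obtain ⟨h1, h2, h3⟩ := ih b P h
      subst h0
      refine ⟨h1, ?_, ?_⟩
      · intro x hx; rcases List.mem_cons.mp hx with hx | hx
        · subst hx; simp
        · exact h2 _ hx
      · rcases h3 with h3 | h3
        · exact Or.inl h3
        · exact Or.inr ⟨List.mem_cons_of_mem _ h3.1, h3.2⟩
    · rw [if_neg h0] at h
      by_cases hsb : PySem.Str.startswith s b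
      · rw [if_pos hsb] at h
        obtain ⟨h1, h2, h3⟩ := ih s P h
        have hbs : b.toList <+: s.toList := (sw_iff s b).mp hsb
        refine ⟨hbs.trans h1, ?_, ?_⟩
        · intro x hx; rcases List.mem_cons.mp hx with hx | hx
          · subst hx; exact h1
          · exact h2 _ hx
        · rcases h3 with h3 | h3
          · exact Or.inr ⟨by simp [h3], by rw [h3]; exact h0⟩
          · exact Or.inr ⟨List.mem_cons_of_mem _ h3.1, h3.2⟩
      · rw [if_neg hsb] at h
        by_cases hbsw : PySem.Str.startswith b s
        · rw [if_pos hbsw] at h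
          obtain ⟨h1, h2, h3⟩ := ih b P h
          have hsb' : s.toList <+: b.toList := (sw_iff b s).mp hbsw
          refine ⟨h1, ?_, ?_⟩
          · intro x hx; rcases List.mem_cons.mp hx with hx | hx
            · subst hx; exact hsb'.trans h1
            · exact h2 _ hx
          · rcases h3 with h3 | h3
            · exact Or.inl h3
            · exact Or.inr ⟨List.mem_cons_of_mem _ h3.1, h3.2⟩
        · rw [if_neg hbsw] at h; cases h

theorem foldPre_total : ∀ (L : List String) (b : String) (c : List Char),
    (∀ s ∈ L, s.toList <+: c) → b.toList <+: c → ∃ P, foldPre L b = some P := by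
  intro L
  induction L with
  | nil => intro b c _ _; exact ⟨b, rfl⟩
  | cons s rest ih =>
    intro b c hL hb
    rw [foldPre]
    by_cases h0 : s = ""
    · rw [if_pos h0]; exact ih b c (fun x hx => hL x (List.mem_cons_of_mem _ hx)) hb
    · rw [if_neg h0]
      have hs : s.toList <+: c := hL s List.mem_cons_self
      rcases List.prefix_or_prefix_of_prefix hb hs with hc | hc
      · have : PySem.Str.startswith s b = true := (sw_iff s b).mpr hc
        rw [if_pos this]
        exact ih s c (fun x hx => hL x (List.mem_cons_of_mem _ hx)) hs
      · by_cases hsb : PySem.Str.startswith s b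
        · rw [if_pos hsb]
          exact ih s c (fun x hx => hL x (List.mem_cons_of_mem _ hx)) hs
        · rw [if_neg hsb, if_pos ((sw_iff b s).mpr hc)]
          exact ih b c (fun x hx => hL x (List.mem_cons_of_mem _ hx)) hb
theorem pairwise_getLastD_max {α : Type} (key : α → Int) :
    ∀ (l : List α), l.Pairwise (fun a b => key a ≤ key b) → ∀ (d : α), ∀ x ∈ l, key x ≤ key (l.getLastD d) := by
  intro l
  induction l with
  | nil => intro _ d x hx; cases hx
  | cons a t ih =>
    intro hp d x hx
    cases t with
    | nil => simp at hx; subst hx; simp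
    | cons b u =>
      have hp' := (List.pairwise_cons.mp hp)
      rcases List.mem_cons.mp hx with hx | hx
      · subst hx
        calc key x ≤ key ((b :: u).getLastD d) := by
              have := ih hp'.2 d
              have hm : key x ≤ key b := hp'.1 b (by simp)
              exact le_trans hm (this b (by simp))
          _ = key ((x :: b :: u).getLastD d) := by simp [List.getLastD]
      · have := ih hp'.2 d x hx
        simpa [List.getLastD] using this

def lastMax (F : List String) : String := (PySem.List.sorted F PySem.Str.len).getLastD ""

theorem lastMax_mem (F : List String) (h : F ≠ []) : lastMax F ∈ F := by
  have hs : PySem.List.sorted F PySem.Str.len ≠ [] := by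
    intro he; exact h ((PySem.List.sorted_eq_nil_iff F PySem.Str.len false).mp he)
  have : lastMax F ∈ PySem.List.sorted F PySem.Str.len := by
    unfold lastMax
    cases hq : PySem.List.sorted F PySem.Str.len with
    | nil => exact absurd hq hs
    | cons a t =>
      rw [List.getLastD_eq_getLast?, List.getLast?_eq_getLast_of_ne_nil (by simp : a :: t ≠ [])]
      simp only [Option.getD_some]
      exact List.getLast_mem _
  exact (PySem.List.mem_sorted F PySem.Str.len false (lastMax F)).mp this

theorem lastMax_max (F : List String) : ∀ x ∈ F, PySem.Str.len x ≤ PySem.Str.len (lastMax F) := by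
  intro x hx
  have hp := PySem.List.sorted_pairwise F PySem.Str.len
  have hm : x ∈ PySem.List.sorted F PySem.Str.len := (PySem.List.mem_sorted F PySem.Str.len false x).mpr hx
  exact pairwise_getLastD_max PySem.Str.len _ hp "" x hm
theorem toList_eq_nil (s : String) (h : s.toList = []) : s = "" := by
  apply String.toList_inj.mp; simp [h]

theorem len_le_iff (a b : String) : PySem.Str.len a ≤ PySem.Str.len b ↔ a.toList.length ≤ b.toList.length := by
  simp [PySem.Str.len_eq]

theorem foldPre_eq_some (L : List String)
    (hok : ∀ s ∈ L.filter (fun x => x ≠ ""), s.toList <+: (lastMax (L.filter (fun x => x ≠ ""))).toList) :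
    foldPre L "" = some (lastMax (L.filter (fun x => x ≠ ""))) := by
  set F := L.filter (fun x => x ≠ "") with hF
  set M := lastMax F with hM
  have hall : ∀ s ∈ L, s.toList <+: M.toList := by
    intro s hs
    by_cases h0 : s = ""
    · subst h0; simp
    · exact hok s (List.mem_filter.mpr ⟨hs, by simp [h0]⟩)
  obtain ⟨P, hP⟩ := foldPre_total L "" M.toList hall (by simp)
  obtain ⟨_, h2, h3⟩ := foldPre_some L "" P hP
  by_cases hFe : F = []
  · have hM0 : M = "" := by rw [hM, hFe]; decide
    rcases h3 with h3 | h3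
    · rw [hP, h3, hM0]
    · exact absurd (List.mem_filter.mpr ⟨h3.1, decide_eq_true h3.2⟩) (by rw [← hF, hFe]; simp)
  · have hMF : M ∈ F := lastMax_mem F hFe
    have hML : M ∈ L := (List.mem_filter.mp hMF).1
    have hMne : M ≠ "" := by simpa using (List.mem_filter.mp hMF).2
    have hMP : M.toList <+: P.toList := h2 M hML
    rcases h3 with h3 | h3
    · subst h3
      have h0 : ("" : String).toList = [] := rfl
      rw [h0] at hMP
      exact absurd (toList_eq_nil M (List.prefix_nil.mp hMP)) hMne
    · have hPF : P ∈ F := List.mem_filter.mpr ⟨h3.1, by simp [h3.2]⟩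
      have hPM : P.toList <+: M.toList := hok P hPF
      have : P = M := String.toList_inj.mp (hPM.eq_of_length (le_antisymm hPM.length_le hMP.length_le))
      rw [hP, this]

theorem foldPre_eq_none (L : List String)
    (hbad : ¬ ∀ s ∈ L.filter (fun x => x ≠ ""), s.toList <+: (lastMax (L.filter (fun x => x ≠ ""))).toList) :
    foldPre L "" = none := by
  set F := L.filter (fun x => x ≠ "") with hF
  set M := lastMax F with hM
  cases hP : foldPre L "" with
  | none => rfl
  | some P =>
    exfalso
    obtain ⟨_, h2, _⟩ := foldPre_some L "" P hP
    push_neg at hbad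
    obtain ⟨s, hsF, hsM⟩ := hbad
    have hFe : F ≠ [] := by intro he; rw [he] at hsF; cases hsF
    have hMF : M ∈ F := lastMax_mem F hFe
    have hsP : s.toList <+: P.toList := h2 s (List.mem_filter.mp hsF).1
    have hMP : M.toList <+: P.toList := h2 M (List.mem_filter.mp hMF).1
    rcases List.prefix_or_prefix_of_prefix hsP hMP with hc | hc
    · exact hsM hc
    · have hlen : s.toList.length ≤ M.toList.length := (len_le_iff s M).mp (lastMax_max F s hsF)
      have : M.toList = s.toList := hc.eq_of_length (le_antisymm hc.length_le hlen)
      exact hsM (this ▸ List.prefix_refl _)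
def foldSuf : List String → String → Option String
  | [], b => some b
  | s :: rest, b =>
    if s = "" then foldSuf rest b
    else if PySem.Str.endswith s b then foldSuf rest s
    else if PySem.Str.endswith b s then foldSuf rest b
    else none

theorem ew_iff (s b : String) : PySem.Str.endswith s b = true ↔ b.toList <:+ s.toList := by
  rw [PySem.Str.endswith_eq]; exact PySem.Chars.endswith_iff _ _

theorem foldSuf_some : ∀ (L : List String) (b P : String), foldSuf L b = some P →
    b.toList <:+ P.toList ∧ (∀ s ∈ L, s.toList <:+ P.toList) ∧ (P = b ∨ (P ∈ L ∧ P ≠ "")) := by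
  intro L
  induction L with
  | nil => intro b P h; simp [foldSuf] at h; subst h; simp
  | cons s rest ih =>
    intro b P h
    rw [foldSuf] at h
    by_cases h0 : s = ""
    · rw [if_pos h0] at h
      obtain ⟨h1, h2, h3⟩ := ih b P h
      subst h0
      refine ⟨h1, ?_, ?_⟩
      · intro x hx; rcases List.mem_cons.mp hx with hx | hx
        · subst hx; simp
        · exact h2 _ hx
      · rcases h3 with h3 | h3
        · exact Or.inl h3
        · exact Or.inr ⟨List.mem_cons_of_mem _ h3.1, h3.2⟩
    · rw [if_neg h0] at h
      by_cases hsb : PySem.Str.endswith s b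
      · rw [if_pos hsb] at h
        obtain ⟨h1, h2, h3⟩ := ih s P h
        have hbs : b.toList <:+ s.toList := (ew_iff s b).mp hsb
        refine ⟨hbs.trans h1, ?_, ?_⟩
        · intro x hx; rcases List.mem_cons.mp hx with hx | hx
          · subst hx; exact h1
          · exact h2 _ hx
        · rcases h3 with h3 | h3
          · exact Or.inr ⟨by simp [h3], by rw [h3]; exact h0⟩
          · exact Or.inr ⟨List.mem_cons_of_mem _ h3.1, h3.2⟩
      · rw [if_neg hsb] at h
        by_cases hbsw : PySem.Str.endswith b s
        · rw [if_pos hbsw] at h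
          obtain ⟨h1, h2, h3⟩ := ih b P h
          have hsb' : s.toList <:+ b.toList := (ew_iff b s).mp hbsw
          refine ⟨h1, ?_, ?_⟩
          · intro x hx; rcases List.mem_cons.mp hx with hx | hx
            · subst hx; exact hsb'.trans h1
            · exact h2 _ hx
          · rcases h3 with h3 | h3
            · exact Or.inl h3
            · exact Or.inr ⟨List.mem_cons_of_mem _ h3.1, h3.2⟩
        · rw [if_neg hbsw] at h; cases h

theorem foldSuf_total : ∀ (L : List String) (b : String) (c : List Char),
    (∀ s ∈ L, s.toList <:+ c) → b.toList <:+ c → ∃ P, foldSuf L b = some P := by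
  intro L
  induction L with
  | nil => intro b c _ _; exact ⟨b, rfl⟩
  | cons s rest ih =>
    intro b c hL hb
    rw [foldSuf]
    by_cases h0 : s = ""
    · rw [if_pos h0]; exact ih b c (fun x hx => hL x (List.mem_cons_of_mem _ hx)) hb
    · rw [if_neg h0]
      have hs : s.toList <:+ c := hL s List.mem_cons_self
      rcases List.suffix_or_suffix_of_suffix hb hs with hc | hc
      · have : PySem.Str.endswith s b = true := (ew_iff s b).mpr hc
        rw [if_pos this]
        exact ih s c (fun x hx => hL x (List.mem_cons_of_mem _ hx)) hs
      · by_cases hsb : PySem.Str.endswith s b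
        · rw [if_pos hsb]
          exact ih s c (fun x hx => hL x (List.mem_cons_of_mem _ hx)) hs
        · rw [if_neg hsb, if_pos ((ew_iff b s).mpr hc)]
          exact ih b c (fun x hx => hL x (List.mem_cons_of_mem _ hx)) hb

theorem foldSuf_eq_some (L : List String)
    (hok : ∀ s ∈ L.filter (fun x => x ≠ ""), s.toList <:+ (lastMax (L.filter (fun x => x ≠ ""))).toList) :
    foldSuf L "" = some (lastMax (L.filter (fun x => x ≠ ""))) := by
  set F := L.filter (fun x => x ≠ "") with hF
  set M := lastMax F with hM
  have hall : ∀ s ∈ L, s.toList <:+ M.toList := by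
    intro s hs
    by_cases h0 : s = ""
    · subst h0; simp
    · exact hok s (List.mem_filter.mpr ⟨hs, by simp [h0]⟩)
  obtain ⟨P, hP⟩ := foldSuf_total L "" M.toList hall (by simp)
  obtain ⟨_, h2, h3⟩ := foldSuf_some L "" P hP
  by_cases hFe : F = []
  · have hM0 : M = "" := by rw [hM, hFe]; decide
    rcases h3 with h3 | h3
    · rw [hP, h3, hM0]
    · exact absurd (List.mem_filter.mpr ⟨h3.1, decide_eq_true h3.2⟩) (by rw [← hF, hFe]; simp)
  · have hMF : M ∈ F := lastMax_mem F hFe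
    have hML : M ∈ L := (List.mem_filter.mp hMF).1
    have hMne : M ≠ "" := by simpa using (List.mem_filter.mp hMF).2
    have hMP : M.toList <:+ P.toList := h2 M hML
    rcases h3 with h3 | h3
    · subst h3
      have h0 : ("" : String).toList = [] := rfl
      rw [h0] at hMP
      exact absurd (toList_eq_nil M (List.suffix_nil.mp hMP)) hMne
    · have hPF : P ∈ F := List.mem_filter.mpr ⟨h3.1, decide_eq_true h3.2⟩
      have hPM : P.toList <:+ M.toList := hok P hPF
      have : P = M := String.toList_inj.mp (hPM.eq_of_length (le_antisymm hPM.length_le hMP.length_le))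
      rw [hP, this]

theorem foldSuf_eq_none (L : List String)
    (hbad : ¬ ∀ s ∈ L.filter (fun x => x ≠ ""), s.toList <:+ (lastMax (L.filter (fun x => x ≠ ""))).toList) :
    foldSuf L "" = none := by
  set F := L.filter (fun x => x ≠ "") with hF
  set M := lastMax F with hM
  cases hP : foldSuf L "" with
  | none => rfl
  | some P =>
    exfalso
    obtain ⟨_, h2, _⟩ := foldSuf_some L "" P hP
    push_neg at hbad
    obtain ⟨s, hsF, hsM⟩ := hbad
    have hFe : F ≠ [] := by intro he; rw [he] at hsF; cases hsF
    have hMF : M ∈ F := lastMax_mem F hFe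
    have hsP : s.toList <:+ P.toList := h2 s (List.mem_filter.mp hsF).1
    have hMP : M.toList <:+ P.toList := h2 M (List.mem_filter.mp hMF).1
    rcases List.suffix_or_suffix_of_suffix hsP hMP with hc | hc
    · exact hsM hc
    · have hlen : s.toList.length ≤ M.toList.length := (len_le_iff s M).mp (lastMax_max F s hsF)
      have : M.toList = s.toList := hc.eq_of_length (le_antisymm hc.length_le hlen)
      exact hsM (this ▸ List.suffix_refl _)
def preTok (p : String) : String := if (splitStar p).length = 1 then "" else (splitStar p).headI
def sufTok (p : String) : String := if (splitStar p).length = 1 then "" else (splitStar p).getLastD ""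
def midTok (p : String) : List String := if (splitStar p).length = 1 then [(splitStar p).headI] else (splitStar p).tail.dropLast
def tokA (p : String) : List String :=
  let t1 := if (splitStar p).headI ≠ "" then (splitStar p).tail else splitStar p
  if t1.getLastD "" ≠ "" then t1.dropLast else t1

theorem splitStar_empty : splitStar "" = [""] := by decide

theorem foldPre_cons (s b : String) (rest : List String) :
    foldPre (s :: rest) b =
      match (if s = "" then some b
             else if PySem.Str.startswith s b then some s
             else if PySem.Str.startswith b s then some b
             else none) with
      | none => none
      | some b' => foldPre rest b' := by
  rw [foldPre]
  by_cases h0 : s = ""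
  · rw [if_pos h0, if_pos h0]
  · rw [if_neg h0, if_neg h0]
    by_cases h1 : PySem.Str.startswith s b
    · rw [if_pos h1, if_pos h1]
    · rw [if_neg h1, if_neg h1]
      by_cases h2 : PySem.Str.startswith b s
      · rw [if_pos h2, if_pos h2]
      · rw [if_neg h2, if_neg h2]

theorem foldSuf_cons (s b : String) (rest : List String) :
    foldSuf (s :: rest) b =
      match (if s = "" then some b
             else if PySem.Str.endswith s b then some s
             else if PySem.Str.endswith b s then some b
             else none) with
      | none => none
      | some b' => foldSuf rest b' := by
  rw [foldSuf]
  by_cases h0 : s = ""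
  · rw [if_pos h0, if_pos h0]
  · rw [if_neg h0, if_neg h0]
    by_cases h1 : PySem.Str.endswith s b
    · rw [if_pos h1, if_pos h1]
    · rw [if_neg h1, if_neg h1]
      by_cases h2 : PySem.Str.endswith b s
      · rw [if_pos h2, if_pos h2]
      · rw [if_neg h2, if_neg h2]

theorem B_decomp : ∀ (ps : List String) (pre suf : String) (mid : List String),
    solveAltLoop ps pre suf mid =
      match foldPre (ps.map preTok) pre, foldSuf (ps.map sufTok) suf with
      | some P, some S => PySem.Str.join "" ([P] ++ (mid ++ ps.flatMap midTok) ++ [S])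
      | _, _ => "*" := by
  intro ps
  induction ps with
  | nil => intro pre suf mid; simp [solveAltLoop, foldPre, foldSuf]
  | cons p rest ih =>
    intro pre suf mid
    rw [solveAltLoop]
    simp only [List.map_cons, List.flatMap_cons, foldPre_cons, foldSuf_cons]
    by_cases h1 : (splitStar p).length = 1
    · rw [if_pos (by simpa using h1)]
      have hpre : preTok p = "" := by simp [preTok, h1]
      have hsuf : sufTok p = "" := by simp [sufTok, h1]
      have hmid : midTok p = [(splitStar p).headI] := by simp [midTok, h1]
      rw [hpre, hsuf, hmid, ih]
      simp only [if_pos rfl]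
      simp [List.append_assoc]
    · rw [if_neg (by simpa using h1)]
      have hpre : preTok p = (splitStar p).headI := by simp [preTok, h1]
      have hsuf : sufTok p = (splitStar p).getLastD "" := by simp [sufTok, h1]
      have hmid : midTok p = (splitStar p).tail.dropLast := by simp [midTok, h1]
      rw [hpre, hsuf, hmid]
      cases hE1 : (if (splitStar p).headI = "" then some pre
                   else if PySem.Str.startswith ((splitStar p).headI) pre then some ((splitStar p).headI)
                   else if PySem.Str.startswith pre ((splitStar p).headI) then some pre
                   else none) with
      | none => dsimp only
      | some pre' =>
        dsimp only
        cases hE2 : (if (splitStar p).getLastD "" = "" then some suf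
                     else if PySem.Str.endswith ((splitStar p).getLastD "") suf then some ((splitStar p).getLastD "")
                     else if PySem.Str.endswith suf ((splitStar p).getLastD "") then some suf
                     else none) with
        | none => dsimp only; cases foldPre (rest.map preTok) pre' <;> rfl
        | some suf' =>
          dsimp only
          rw [ih]
          simp [List.append_assoc]
theorem tokA_empty : tokA "" = [""] := by decide
theorem preTok_empty : preTok "" = "" := by decide
theorem sufTok_empty : sufTok "" = "" := by decide

theorem glD {α : Type} (a : α) (t : List α) (d : α) (h : t ≠ []) :
    (a :: t).getLast?.getD d = t.getLast?.getD d := by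
  rw [List.getLast?_eq_getLast_of_ne_nil h, List.getLast?_eq_getLast_of_ne_nil (by simp : (a :: t) ≠ [])]
  simp [List.getLast_cons h]

theorem solveLoopA_eq : ∀ (ps : List String) (T : List (List String)) (S E : List String),
    (∀ p ∈ ps, p = "" ∨ PySem.Str.isIn "*" p = true) →
    solveLoopA ps T S E = some (T ++ ps.map tokA,
      S ++ (ps.map preTok).filter (fun x => x ≠ ""),
      E ++ (ps.map sufTok).filter (fun x => x ≠ "")) := by
  intro ps
  induction ps with
  | nil => intro T S E _; simp [solveLoopA]
  | cons p rest ih =>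
    intro T S E hpre
    have hp := hpre p List.mem_cons_self
    have hrest := fun q hq => hpre q (List.mem_cons_of_mem _ hq)
    rw [solveLoopA]
    rcases hp with hp | hp
    · subst hp
      simp only [splitStar_empty, List.headI]
      rw [if_neg (by simp), if_neg (by simp)]
      rw [show PySem.List.pyGet? [("" : String)] (-1) = some "" from rfl]
      simp only
      rw [if_neg (by simp), if_neg (by simp)]
      rw [ih _ _ _ hrest]
      simp [tokA_empty, preTok_empty, sufTok_empty]
    · obtain ⟨a, t, hsp, htne⟩ : ∃ a t, splitStar p = a :: t ∧ t ≠ [] := by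
        have h2 := two_le_splitStar p hp
        cases hq : splitStar p with
        | nil => rw [hq] at h2; simp at h2
        | cons a t =>
          cases t with
          | nil => rw [hq] at h2; simp at h2
          | cons b u => exact ⟨a, b :: u, rfl, by simp⟩
      have hlen1 : ¬ (splitStar p).length = 1 := by
        rw [hsp, List.length_cons]
        intro h
        exact htne (List.length_eq_zero_iff.mp (by omega))
      have hpreT : preTok p = a := by
        unfold preTok; rw [if_neg hlen1, hsp]; rfl
      have hsufT : sufTok p = t.getLast?.getD "" := by
        unfold sufTok; rw [if_neg hlen1, hsp, List.getLastD_eq_getLast?]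
        exact glD a t "" htne
      simp only [hsp, List.headI, List.tail_cons]
      by_cases ha : a = ""
      · rw [if_neg (by simp [ha]), if_neg (by simp [ha])]
        rw [pyGet?_neg_one (a :: t) "" (by simp)]
        simp only [List.getLastD_eq_getLast?, glD a t "" htne]
        by_cases hl : t.getLast?.getD "" = ""
        · rw [if_neg (by simp [hl]), if_neg (by simp [hl])]
          rw [ih _ _ _ hrest]
          have htok : tokA p = a :: t := by
            simp [tokA, hsp, ha, List.getLastD_eq_getLast?, glD "" t "" htne, hl]
          have hsuf0 : sufTok p = "" := by rw [hsufT]; exact hl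
          simp [htok, hpreT, hsuf0, ha]
        · rw [if_pos (by simp [hl]), if_pos (by simp [hl])]
          rw [ih _ _ _ hrest]
          have htok : tokA p = (a :: t).dropLast := by
            simp [tokA, hsp, ha, List.getLastD_eq_getLast?, glD "" t "" htne, hl]
          have hsufne : sufTok p = t.getLast?.getD "" := hsufT
          simp [htok, hpreT, hsufne, ha, hl]
      · rw [if_pos (by simp [ha]), if_pos (by simp [ha])]
        rw [pyGet?_neg_one t "" htne]
        simp only [List.getLastD_eq_getLast?]
        by_cases hl : t.getLast?.getD "" = ""
        · rw [if_neg (by simp [hl]), if_neg (by simp [hl])]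
          rw [ih _ _ _ hrest]
          have htok : tokA p = t := by
            simp [tokA, hsp, ha, List.getLastD_eq_getLast?, hl]
          have hsuf0 : sufTok p = "" := by rw [hsufT]; exact hl
          simp [htok, hpreT, hsuf0, ha]
        · rw [if_pos (by simp [hl]), if_pos (by simp [hl])]
          rw [ih _ _ _ hrest]
          have htok : tokA p = t.dropLast := by
            simp [tokA, hsp, ha, List.getLastD_eq_getLast?, hl]
          have hsufne : sufTok p = t.getLast?.getD "" := hsufT
          simp [htok, hpreT, hsufne, ha, hl]
theorem joinNil : ∀ (xss : List (List Char)), PySem.Chars.join [] xss = xss.flatten := by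
  intro xss
  induction xss with
  | nil => simp [PySem.Chars.join_nil]
  | cons p rest ih =>
    cases rest with
    | nil => simp [PySem.Chars.join_singleton]
    | cons q u => rw [PySem.Chars.join_cons_cons, ih]; simp

theorem join_toList (xs : List String) : (PySem.Str.join "" xs).toList = (xs.map String.toList).flatten := by
  rw [PySem.Str.toList_join]
  rw [show ("" : String).toList = [] from rfl]
  exact joinNil _

theorem flatten_map_flatMap (f : String → List String) : ∀ (ps : List String),
    ((ps.flatMap f).map String.toList).flatten = (ps.map (fun p => ((f p).map String.toList).flatten)).flatten := by
  intro ps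
  induction ps with
  | nil => simp
  | cons p rest ih => simp [ih]

theorem tok_join_eq (p : String) (hp : p = "" ∨ PySem.Str.isIn "*" p = true) :
    ((tokA p).map String.toList).flatten = ((midTok p).map String.toList).flatten := by
  rcases hp with hp | hp
  · subst hp; decide
  · obtain ⟨a, t, hsp, htne⟩ : ∃ a t, splitStar p = a :: t ∧ t ≠ [] := by
      have h2 := two_le_splitStar p hp
      cases hq : splitStar p with
      | nil => rw [hq] at h2; simp at h2
      | cons a t =>
        cases t with
        | nil => rw [hq] at h2; simp at h2
        | cons b u => exact ⟨a, b :: u, rfl, by simp⟩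
    have hlen1 : ¬ (splitStar p).length = 1 := by
      rw [hsp, List.length_cons]
      intro h
      exact htne (List.length_eq_zero_iff.mp (by omega))
    have hmid : midTok p = t.dropLast := by
      unfold midTok; rw [if_neg hlen1, hsp, List.tail_cons]
    have hdec : t.dropLast ++ [t.getLast htne] = t := List.dropLast_concat_getLast htne
    by_cases ha : a = ""
    · by_cases hl : t.getLast?.getD "" = ""
      · have htok : tokA p = a :: t := by
          simp [tokA, hsp, ha, List.getLastD_eq_getLast?, glD "" t "" htne, hl]
        have hle : (t.getLast htne).toList = [] := by
          rw [List.getLast?_eq_getLast_of_ne_nil htne] at hl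
          simp at hl
          rw [hl]
          rfl
        rw [htok, hmid, ha]
        conv_lhs => rw [← hdec]
        simp [hle]
      · have htok : tokA p = (a :: t).dropLast := by
          simp [tokA, hsp, ha, List.getLastD_eq_getLast?, glD "" t "" htne, hl]
        rw [htok, hmid, ha, List.dropLast_cons_of_ne_nil htne]
        simp
    · by_cases hl : t.getLast?.getD "" = ""
      · have htok : tokA p = t := by
          simp [tokA, hsp, ha, List.getLastD_eq_getLast?, hl]
        have hle : (t.getLast htne).toList = [] := by
          rw [List.getLast?_eq_getLast_of_ne_nil htne] at hl
          simp at hl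
          rw [hl]
          rfl
        rw [htok, hmid]
        conv_lhs => rw [← hdec]
        simp [hle]
      · have htok : tokA p = t.dropLast := by
          simp [tokA, hsp, ha, List.getLastD_eq_getLast?, hl]
        rw [htok, hmid]

theorem check_iff (F : List String) :
    ((PySem.List.sorted F PySem.Str.len).any
      (fun s => !(PySem.Str.startswith ((PySem.List.sorted F PySem.Str.len).getLastD "") s)) = false)
    ↔ ∀ s ∈ F, s.toList <+: (lastMax F).toList := by
  rw [List.any_eq_false]
  constructor
  · intro h s hs
    have := h s ((PySem.List.mem_sorted F PySem.Str.len false s).mpr hs)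
    rw [Bool.not_eq_true, Bool.not_eq_false'] at this
    exact (sw_iff _ _).mp this
  · intro h x hx
    rw [Bool.not_eq_true, Bool.not_eq_false']
    exact (sw_iff _ _).mpr (h x ((PySem.List.mem_sorted F PySem.Str.len false x).mp hx))

theorem check_iff_end (F : List String) :
    ((PySem.List.sorted F PySem.Str.len).any
      (fun s => !(PySem.Str.endswith ((PySem.List.sorted F PySem.Str.len).getLastD "") s)) = false)
    ↔ ∀ s ∈ F, s.toList <:+ (lastMax F).toList := by
  rw [List.any_eq_false]
  constructor
  · intro h s hs
    have := h s ((PySem.List.mem_sorted F PySem.Str.len false s).mpr hs)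
    rw [Bool.not_eq_true, Bool.not_eq_false'] at this
    exact (ew_iff _ _).mp this
  · intro h x hx
    rw [Bool.not_eq_true, Bool.not_eq_false']
    exact (ew_iff _ _).mpr (h x ((PySem.List.mem_sorted F PySem.Str.len false x).mp hx))
theorem final_join (ps : List String)
    (hpre : ∀ p ∈ ps, p = "" ∨ PySem.Str.isIn "*" p = true) (P S : String) :
    PySem.Str.join "" ([P] ++ (ps.map tokA).map (fun t => PySem.Str.join "" t) ++ [S]) =
    PySem.Str.join "" ([P] ++ ([] ++ ps.flatMap midTok) ++ [S]) := by
  apply String.toList_inj.mp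
  rw [join_toList, join_toList]
  have hmidEq : (((ps.map tokA).map (fun t => PySem.Str.join "" t)).map String.toList).flatten
      = ((ps.flatMap midTok).map String.toList).flatten := by
    rw [List.map_map, List.map_map, flatten_map_flatMap midTok ps]
    have hcg : ∀ p ∈ ps, (((String.toList ∘ (fun t => PySem.Str.join "" t)) ∘ tokA) p : List Char)
        = ((midTok p).map String.toList).flatten := by
      intro p hp
      simp only [Function.comp_apply]
      rw [join_toList]
      exact tok_join_eq p (hpre p hp)
    rw [List.map_congr_left hcg]
  simp only [List.map_append, List.flatten_append, List.nil_append, hmidEq]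

set_option maxHeartbeats 1000000 in
theorem solve_main : ∀ (patterns : List String),
    (∀ p ∈ patterns, p = "" ∨ PySem.Str.isIn "*" p = true) →
    solve patterns = solve_alt patterns := by
  intro ps hpre
  rw [solve, solveLoopA_eq ps [] [] [] hpre]
  rw [solve_alt, B_decomp]
  simp only [List.nil_append]
  set Fs := (ps.map preTok).filter (fun x => x ≠ "") with hFs
  set Fe := (ps.map sufTok).filter (fun x => x ≠ "") with hFe
  by_cases hcs : ∀ s ∈ Fs, s.toList <+: (lastMax Fs).toList
  · have hany : (PySem.List.sorted Fs PySem.Str.len).any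
        (fun s => !(PySem.Str.startswith ((PySem.List.sorted Fs PySem.Str.len).getLastD "") s)) = false :=
      (check_iff Fs).mpr hcs
    rw [foldPre_eq_some (ps.map preTok) hcs]
    rw [if_neg (by rw [hany]; simp)]
    by_cases hce : ∀ s ∈ Fe, s.toList <:+ (lastMax Fe).toList
    · have hany2 : (PySem.List.sorted Fe PySem.Str.len).any
          (fun s => !(PySem.Str.endswith ((PySem.List.sorted Fe PySem.Str.len).getLastD "") s)) = false :=
        (check_iff_end Fe).mpr hce
      rw [foldSuf_eq_some (ps.map sufTok) hce]
      rw [if_neg (by rw [hany2]; simp)]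
      rw [show (PySem.List.sorted Fs PySem.Str.len).getLastD "" = lastMax Fs from rfl,
          show (PySem.List.sorted Fe PySem.Str.len).getLastD "" = lastMax Fe from rfl]
      exact final_join ps hpre (lastMax Fs) (lastMax Fe)
    · have hany2 : (PySem.List.sorted Fe PySem.Str.len).any
          (fun s => !(PySem.Str.endswith ((PySem.List.sorted Fe PySem.Str.len).getLastD "") s)) = true := by
        cases hq : (PySem.List.sorted Fe PySem.Str.len).any
            (fun s => !(PySem.Str.endswith ((PySem.List.sorted Fe PySem.Str.len).getLastD "") s)) with
        | true => rfl
        | false => exact absurd ((check_iff_end Fe).mp hq) hce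
      rw [if_pos hany2, foldSuf_eq_none (ps.map sufTok) hce]
  · have hany : (PySem.List.sorted Fs PySem.Str.len).any
        (fun s => !(PySem.Str.startswith ((PySem.List.sorted Fs PySem.Str.len).getLastD "") s)) = true := by
      cases hq : (PySem.List.sorted Fs PySem.Str.len).any
          (fun s => !(PySem.Str.startswith ((PySem.List.sorted Fs PySem.Str.len).getLastD "") s)) with
      | true => rfl
      | false => exact absurd ((check_iff Fs).mp hq) hcs
    rw [if_pos hany, foldPre_eq_none (ps.map preTok) hcs]

-- ===== VERDICT (by name: the statement is the Claim_ definition above) =====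
theorem solve_spec : Claim_equal_solve := by
  intro patterns _ hpre; exact solve_main patterns hpre
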